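-- pv_equiv track=rewrite | github.com/AdamZhouSE/pythonHomework | Code/CodeRecords/2364/60810/285676.py | isRepeat
-- ===== SOURCE A (Python) =====
-- def isRepeat(a):
--     string = []
--     while a > 0:
--         temp = a % 10
--         string.append(temp)
--         a //= 10
--
--     for i in range(0, len(string)-1):
--         for j in range(i + 1, len(string)):
--             if string[i] == string[j]:
--                 return True
--     return False
-- ===== SOURCE B (Python) =====
-- def isRepeat(a):
--     seen = set()
--     while a > 0:
--         d = a % 10
--         if d in seen:
--             return True
--         seen.add(d)
--         a //= 10
--     return False
-- ===== Notes on version B (the rewrite author's own statement) =====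
-- stated objective: faster
-- what changed: Replaced the quadratic nested pairwise scan over the collected digit list by a single digit-extraction pass that checks each digit against a set of already-seen digits and returns True at the first repeat (no digit list is built at all).
import Mathlib
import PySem

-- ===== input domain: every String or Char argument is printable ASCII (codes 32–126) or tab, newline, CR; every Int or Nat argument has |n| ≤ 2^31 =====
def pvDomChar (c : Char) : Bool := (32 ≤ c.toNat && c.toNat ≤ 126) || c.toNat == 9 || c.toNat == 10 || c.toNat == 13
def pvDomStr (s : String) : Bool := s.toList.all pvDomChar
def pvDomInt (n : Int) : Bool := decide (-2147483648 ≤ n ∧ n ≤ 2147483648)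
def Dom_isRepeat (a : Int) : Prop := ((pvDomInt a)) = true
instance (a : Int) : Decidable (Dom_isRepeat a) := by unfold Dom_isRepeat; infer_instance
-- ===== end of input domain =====

-- B replaces A's quadratic nested pairwise scan over the digit list by a single
-- digit-extraction pass with a set of seen digits (early exit on first repeat).
-- All loops are ported with a structural Nat fuel (initialised to an amount that
-- provably suffices), a pure totality guard; the algorithms are unchanged.

-- ===== PORT A =====
-- the 'while a > 0' digit-collecting loop of A (string.append(a % 10); a //= 10)
def digitsAGo (fuel : Nat) (a : Int) : List Int :=
  match fuel with
  | 0 => []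
  | f + 1 =>
    if a > 0 then PySem.Int.mod a 10 :: digitsAGo f (PySem.Int.floordiv a 10) else []

def digitsA (a : Int) : List Int := digitsAGo a.toNat a

-- inner 'for j in range(i+1, len(string))' loop with early return True;
-- indices produced by range are non-negative and in range, so getD is exact there
def loopJGo (fuel : Nat) (s : List Int) (i j : Nat) : Bool :=
  match fuel with
  | 0 => false
  | f + 1 =>
    if j < s.length then
      (if s.getD i 0 = s.getD j 0 then true else loopJGo f s i (j + 1))
    else false

-- outer 'for i in range(0, len(string)-1)' loop
def loopIGo (fuel : Nat) (s : List Int) (i : Nat) : Bool :=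
  match fuel with
  | 0 => false
  | f + 1 =>
    if i < s.length - 1 then
      (if loopJGo (s.length - (i + 1)) s i (i + 1) then true else loopIGo f s (i + 1))
    else false

def isRepeat (a : Int) : Bool :=
  let string := digitsA a
  loopIGo (string.length - 1) string 0

-- ===== PORT B =====
-- the single 'while a > 0' pass of B carrying the set of already-seen digits
def bLoopGo (fuel : Nat) (a : Int) (seen : PySem.Set Int) : Bool :=
  match fuel with
  | 0 => false
  | f + 1 =>
    if a > 0 then
      let d := PySem.Int.mod a 10
      if PySem.Set.contains seen d then true
      else bLoopGo f (PySem.Int.floordiv a 10) (PySem.Set.add seen d)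
    else false

def isRepeat_alt (a : Int) : Bool := bLoopGo a.toNat a PySem.Set.empty

-- ===== PRECONDITION & SPEC =====
def Spec_isRepeat (a : Int) (out : Bool) : Prop := out = isRepeat_alt a
instance (a : Int) (out : Bool) : Decidable (Spec_isRepeat a out) := by unfold Spec_isRepeat; infer_instance

-- ===== CLAIM (what is proved, stated in full; the proofs are below) =====
def Claim_equal_isRepeat : Prop := ∀ (a : Int), Dom_isRepeat a → Spec_isRepeat a (isRepeat a)

-- ===== LEMMAS AND PROOFS =====

theorem div10_facts (a : Int) (h : 0 < a) :
    PySem.Int.floordiv a 10 = a / 10 ∧ (a / 10).toNat < a.toNat := by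
  have h10 : PySem.Int.floordiv a 10 = a / 10 :=
    PySem.Int.floordiv_eq_ediv_of_pos (by norm_num)
  have h3 := Int.emod_nonneg a (by norm_num : (10:Int) ≠ 0)
  have h4 := Int.emod_lt_of_pos a (by norm_num : (0:Int) < 10)
  have h5 := Int.mul_ediv_add_emod a 10
  exact ⟨h10, by omega⟩

theorem digitsAGo_congr (f : Nat) : ∀ (g : Nat) (a : Int),
    a.toNat ≤ f → a.toNat ≤ g → digitsAGo f a = digitsAGo g a := by
  induction f with
  | zero =>
    intro g a hf _
    have : ¬ a > 0 := by omega
    cases g <;> simp [digitsAGo, this]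
  | succ f ih =>
    intro g a hf hg
    by_cases h : a > 0
    · obtain ⟨g', rfl⟩ : ∃ g', g = g' + 1 := ⟨g - 1, by omega⟩
      obtain ⟨h10, hlt⟩ := div10_facts a h
      simp only [digitsAGo, h, if_pos]
      rw [ih g' (PySem.Int.floordiv a 10) (by rw [h10]; omega) (by rw [h10]; omega)]
    · cases g <;> simp [digitsAGo, h]

theorem digitsA_pos (a : Int) (h : 0 < a) :
    digitsA a = PySem.Int.mod a 10 :: digitsA (PySem.Int.floordiv a 10) := by
  obtain ⟨k, hk⟩ : ∃ k, a.toNat = k + 1 := ⟨a.toNat - 1, by omega⟩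
  obtain ⟨h10, hlt⟩ := div10_facts a h
  unfold digitsA
  rw [hk]
  simp only [digitsAGo, h, if_pos]
  rw [digitsAGo_congr k (PySem.Int.floordiv a 10).toNat (PySem.Int.floordiv a 10)
        (by rw [h10]; omega) le_rfl]

theorem digitsA_nonpos (a : Int) (h : ¬ 0 < a) : digitsA a = [] := by
  have : a.toNat = 0 := by omega
  unfold digitsA; rw [this]; rfl

theorem loopJGo_eq (f : Nat) : ∀ (s : List Int) (i j : Nat), s.length - j ≤ f →
    loopJGo f s i j = decide (s.getD i 0 ∈ s.drop j) := by
  induction f with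
  | zero =>
    intro s i j hf
    have : s.drop j = [] := List.drop_eq_nil_of_le (by omega)
    simp [loopJGo, this]
  | succ f ih =>
    intro s i j hf
    by_cases h : j < s.length
    · have hd : s.drop j = s[j] :: s.drop (j + 1) := List.drop_eq_getElem_cons h
      have hg : s.getD j 0 = s[j] := List.getD_eq_getElem s 0 h
      simp only [loopJGo, h, if_pos]
      rw [hd]
      by_cases he : s.getD i 0 = s.getD j 0
      · rw [if_pos he]
        symm; rw [decide_eq_true_iff]
        exact List.mem_cons.mpr (Or.inl (hg ▸ he))
      · rw [if_neg he, ih s i (j + 1) (by omega), decide_eq_decide, List.mem_cons]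
        constructor
        · exact Or.inr
        · rintro (hEq | hm)
          · exact absurd (hg ▸ hEq) he
          · exact hm
    · have : s.drop j = [] := List.drop_eq_nil_of_le (by omega)
      simp [loopJGo, h, this]

theorem loopIGo_eq (f : Nat) : ∀ (s : List Int) (i : Nat), s.length - 1 - i ≤ f →
    loopIGo f s i = decide (¬ (s.drop i).Nodup) := by
  induction f with
  | zero =>
    intro s i hf
    have hlen : (s.drop i).length ≤ 1 := by rw [List.length_drop]; omega
    have hnd : (s.drop i).Nodup := by
      match hc : s.drop i with
      | [] => exact List.nodup_nil
      | [x] => simp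
      | x :: y :: t => rw [hc] at hlen; simp at hlen
    have : ¬ i < s.length - 1 := by omega
    simp [loopIGo, hnd]
  | succ f ih =>
    intro s i hf
    by_cases h : i < s.length - 1
    · have hi : i < s.length := by omega
      have hd : s.drop i = s[i] :: s.drop (i + 1) := List.drop_eq_getElem_cons hi
      have hg : s.getD i 0 = s[i] := List.getD_eq_getElem s 0 hi
      have hJ := loopJGo_eq (s.length - (i + 1)) s i (i + 1) le_rfl
      rw [hg] at hJ
      simp only [loopIGo, h, if_pos]
      by_cases hmem : s[i] ∈ s.drop (i + 1)
      · rw [hJ, decide_eq_true hmem, if_pos rfl]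
        have hnnd : ¬ (s.drop i).Nodup := by
          rw [hd]; exact fun hnd => (List.nodup_cons.mp hnd).1 hmem
        simp [hnnd]
      · rw [hJ, decide_eq_false hmem]
        simp only [Bool.false_eq_true, if_false]
        rw [ih s (i + 1) (by omega), decide_eq_decide, hd, List.nodup_cons]
        tauto
    · have hlen : (s.drop i).length ≤ 1 := by rw [List.length_drop]; omega
      have hnd : (s.drop i).Nodup := by
        match hc : s.drop i with
        | [] => exact List.nodup_nil
        | [x] => simp
        | x :: y :: t => rw [hc] at hlen; simp at hlen
      simp [loopIGo, h, hnd]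

theorem isRepeat_eq_nodup (a : Int) :
    isRepeat a = decide (¬ (digitsA a).Nodup) := by
  have := loopIGo_eq ((digitsA a).length - 1) (digitsA a) 0 (by omega)
  simpa [isRepeat] using this

theorem bLoopGo_eq (f : Nat) : ∀ (a : Int) (seen : PySem.Set Int), a.toNat ≤ f →
    bLoopGo f a seen =
      decide (¬ (digitsA a).Nodup ∨ ∃ x ∈ digitsA a, x ∈ seen) := by
  induction f with
  | zero =>
    intro a seen hf
    have h : ¬ a > 0 := by omega
    rw [digitsA_nonpos a h]
    simp [bLoopGo]
  | succ f ih =>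
    intro a seen hf
    by_cases h : a > 0
    · rw [digitsA_pos a h]
      set d := PySem.Int.mod a 10 with hdd
      set a' := PySem.Int.floordiv a 10 with ha'
      obtain ⟨h10, hlt⟩ := div10_facts a h
      simp only [bLoopGo, h, if_pos]
      rw [← hdd, ← ha']
      by_cases hc : PySem.Set.contains seen d
      · have hdm : d ∈ seen := by exact (PySem.Set.contains_iff seen d).1 hc
        simp only [hc, if_pos]
        symm; rw [decide_eq_true_iff]
        exact Or.inr ⟨d, List.mem_cons_self .., hdm⟩
      · have hdm : d ∉ seen := fun hm => hc ((PySem.Set.contains_iff seen d).2 hm)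
        simp only [hc, Bool.false_eq_true, if_false]
        rw [ih a' (PySem.Set.add seen d) (by rw [ha', h10]; omega), decide_eq_decide]
        have hadd : ∀ x, x ∈ PySem.Set.add seen d ↔ x ∈ seen ∨ x = d := by
          intro x; exact PySem.Set.mem_add seen d x
        simp only [List.nodup_cons, List.mem_cons]
        constructor
        · rintro (hnd | ⟨x, hx, hmem⟩)
          · exact Or.inl (by tauto)
          · rcases (hadd x).1 hmem with hs | rfl
            · exact Or.inr ⟨x, Or.inr hx, hs⟩
            · exact Or.inl (by tauto)
        · rintro (hnd | ⟨x, hx, hs⟩)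
          · by_cases hdr : d ∈ digitsA a'
            · exact Or.inr ⟨d, hdr, (hadd d).2 (Or.inr rfl)⟩
            · exact Or.inl (by tauto)
          · rcases hx with rfl | hx
            · exact absurd hs hdm
            · exact Or.inr ⟨x, hx, (hadd x).2 (Or.inl hs)⟩
    · rw [digitsA_nonpos a h]
      simp [bLoopGo, h]

-- ===== VERDICT (by name: the statement is the Claim_ definition above) =====
theorem isRepeat_spec : Claim_equal_isRepeat := by
  intro a _
  unfold Spec_isRepeat isRepeat_alt
  rw [bLoopGo_eq a.toNat a PySem.Set.empty le_rfl, isRepeat_eq_nodup]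
  simp [PySem.Set.empty]
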